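-- pv_equiv track=rewrite | github.com/whiskey0705/MITx-6.00.1x | week3/problem_set/hangman.py | get_remaining_letters
-- ===== SOURCE A (Python) =====
-- import random, string
--
-- def get_remaining_letters(letters_guessed):
-- 	"""
-- 	letters_guessed: list, 到目前为止已经猜过的字母
-- 	alpha: string, 26个小写字母按顺序排列的字符串
-- 	return: string, 剩余还没猜过的字母组成的字符串
-- 	"""
-- 	# 生成一个由26个小写字母按升序组成的字符串
-- 	alpha = string.ascii_lowercase
-- 	# 转换为list， 方便替换
-- 	alpha_list = list(alpha)
--
-- 	# 循环遍历letters_guessed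
-- 	for lt in letters_guessed:
-- 		# 如果该字母在alpha_list里，就移除
-- 		if lt in alpha_list:
-- 			alpha_list.remove(lt)
-- 	# 把列表重新组合为string, 并返回
-- 	remaining_letters = ''.join(alpha_list)
-- 	return remaining_letters
-- ===== SOURCE B (Python) =====
-- import string
--
-- def get_remaining_letters(letters_guessed):
--     guessed = set(letters_guessed)
--     out = []
--     for code in range(ord('a'), ord('z') + 1):
--         ch = chr(code)
--         if ch not in guessed:
--             out.append(ch)
--     return ''.join(out)
-- ===== Notes on version B (the rewrite author's own statement) =====
-- stated objective: faster
-- what changed: B builds a set of guessed letters once and iterates over character codes 97..122 appending each letter not in the set, instead of A's loop over letters_guessed that does a linear 'in'/remove on a copy of the alphabet list for every guess.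
import Mathlib
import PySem

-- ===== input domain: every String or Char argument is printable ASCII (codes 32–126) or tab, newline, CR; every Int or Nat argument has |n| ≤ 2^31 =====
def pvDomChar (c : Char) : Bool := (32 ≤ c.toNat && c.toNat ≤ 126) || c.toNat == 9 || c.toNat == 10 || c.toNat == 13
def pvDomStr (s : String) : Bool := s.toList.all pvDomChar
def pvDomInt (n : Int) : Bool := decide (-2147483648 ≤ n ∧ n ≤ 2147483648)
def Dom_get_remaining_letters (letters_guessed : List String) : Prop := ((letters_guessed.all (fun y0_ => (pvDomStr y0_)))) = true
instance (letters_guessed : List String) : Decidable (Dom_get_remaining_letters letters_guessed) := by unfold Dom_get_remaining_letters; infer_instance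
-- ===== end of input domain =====

-- B builds the guessed set once and iterates over character codes 97..122 appending unguessed letters,
-- instead of A's remove-loop over letters_guessed on a copy of the alphabet; objective: alternative.

-- ===== PORT A =====
-- string.ascii_lowercase turned into a list of its 26 one-character strings (list(alpha))
def pvAlphaList : List String :=
  ["a","b","c","d","e","f","g","h","i","j","k","l","m",
   "n","o","p","q","r","s","t","u","v","w","x","y","z"]

-- for lt in letters_guessed: if lt in alpha_list: alpha_list.remove(lt); then ''.join(alpha_list)
def get_remaining_letters (letters_guessed : List String) : String :=
  PySem.Str.join "" (letters_guessed.foldl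
    (fun alpha_list lt => if lt ∈ alpha_list then alpha_list.erase lt else alpha_list) pvAlphaList)

-- ===== PORT B =====
-- guessed = set(letters_guessed); for code in range(97, 123): ch = chr(code); if ch not in guessed: out.append(ch); ''.join(out)
def get_remaining_letters_alt (letters_guessed : List String) : String :=
  let guessed : PySem.Set String := PySem.Set.ofList letters_guessed
  let out := (PySem.List.pyRange 97 123 1).foldl
    (fun out code =>
      if !(PySem.Set.contains guessed (String.mk [Char.ofNat code.toNat]))
      then out ++ [String.mk [Char.ofNat code.toNat]] else out) []
  PySem.Str.join "" out

-- ===== PRECONDITION & SPEC =====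
def Spec_get_remaining_letters (letters_guessed : List String) (out : String) : Prop := out = get_remaining_letters_alt letters_guessed
instance (letters_guessed : List String) (out : String) : Decidable (Spec_get_remaining_letters letters_guessed out) := by unfold Spec_get_remaining_letters; infer_instance

-- ===== CLAIM =====
def Claim_equal_get_remaining_letters : Prop := ∀ (letters_guessed : List String), Dom_get_remaining_letters letters_guessed → Spec_get_remaining_letters letters_guessed (get_remaining_letters letters_guessed)

-- ===== LEMMAS AND PROOFS =====

-- A's remove-loop over gs starting from a duplicate-free list is filtering by non-membership in gs.
theorem pv_foldl_erase_eq_filter (gs : List String) :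
    ∀ (L : List String), L.Nodup →
      gs.foldl (fun st lt => if lt ∈ st then st.erase lt else st) L
        = L.filter (fun c => !(gs.contains c)) := by
  induction gs with
  | nil => intro L _; simp
  | cons g gs ih =>
    intro L hL
    simp only [List.foldl_cons]
    by_cases hg : g ∈ L
    · rw [if_pos hg, ih (L.erase g) (hL.erase g), hL.erase_eq_filter g,
        List.filter_filter]
      apply List.filter_congr
      intro c _
      by_cases hcg : c = g <;> simp [hcg]
    · rw [if_neg hg, ih L hL]
      apply List.filter_congr
      intro c hc
      have : c ≠ g := fun h => hg (h ▸ hc)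
      simp [this]

-- the code range 97..122, mapped to one-character strings, is exactly the alphabet list
theorem pv_range_map_alpha :
    (PySem.List.pyRange 97 123 1).map (fun code => String.mk [Char.ofNat code.toNat])
      = pvAlphaList := by decide

-- ===== VERDICT =====
theorem get_remaining_letters_spec : Claim_equal_get_remaining_letters := by
  intro lg _
  unfold Spec_get_remaining_letters get_remaining_letters get_remaining_letters_alt
  rw [pv_foldl_erase_eq_filter lg pvAlphaList (by decide)]
  simp only [PySem.List.foldl_append_if, List.nil_append]
  rw [← pv_range_map_alpha, List.filter_map]
  congr 1
  congr 1
  apply List.filter_congr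
  intro code _
  simp [PySem.Set.contains_eq_listContains, PySem.Set.mem_ofList, Function.comp]
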